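-- pv_equiv track=rewrite | github.com/Krevitzz/prc_framework | prc/analysing/clustering_lite.py | _extract_common_features
-- ===== SOURCE A (Python) =====
-- from typing import Dict, List, Optional, Set, Tuple
--
-- def _extract_common_features(rows: List[Dict]) -> Set[str]:
--     """Features présentes dans TOUS les runs, flags booléens exclus."""
--     if not rows:
--         return set()
--     common = set(rows[0]['features'].keys())
--     for row in rows[1:]:
--         common &= set(row['features'].keys())
--     return {k for k in common
--             if not k.startswith('has_') and not k.startswith('is_')}
-- ===== SOURCE B (Python) =====
-- from typing import Dict, List, Set
--
-- def _extract_common_features(rows: List[Dict]) -> Set[str]: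
--     """Features present in ALL runs, boolean flags excluded (single counting pass)."""
--     counts: Dict[str, int] = {}
--     for row in rows:
--         for k in row['features']:
--             counts[k] = counts.get(k, 0) + 1
--     n = len(rows)
--     return {k for k, c in counts.items()
--             if c == n and not k.startswith('has_') and not k.startswith('is_')}
-- ===== Notes on version B (the rewrite author's own statement) =====
-- stated objective: alternative
-- what changed: B replaces A's running set-intersection over successive rows by a single counting pass that builds a key-frequency dict and keeps the keys whose count equals len(rows) (keys are unique within a row, so count==len(rows) is exactly membership in every row), with the same prefix filter.
import Mathlib
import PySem

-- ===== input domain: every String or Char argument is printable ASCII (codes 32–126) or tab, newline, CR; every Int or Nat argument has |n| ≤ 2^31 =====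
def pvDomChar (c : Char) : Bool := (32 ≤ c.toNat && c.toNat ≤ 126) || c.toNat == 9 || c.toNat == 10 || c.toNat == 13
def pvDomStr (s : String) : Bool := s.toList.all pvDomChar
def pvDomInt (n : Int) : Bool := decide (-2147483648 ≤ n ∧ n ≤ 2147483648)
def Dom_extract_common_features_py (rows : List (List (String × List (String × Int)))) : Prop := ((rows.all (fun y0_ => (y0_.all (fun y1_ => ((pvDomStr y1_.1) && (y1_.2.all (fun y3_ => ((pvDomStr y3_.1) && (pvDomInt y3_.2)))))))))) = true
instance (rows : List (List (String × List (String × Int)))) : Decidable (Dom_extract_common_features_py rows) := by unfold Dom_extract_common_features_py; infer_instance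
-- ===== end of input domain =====

-- B replaces A's running set-intersection over rows by a single counting pass
-- (a dict of key frequencies), selecting keys whose count equals len(rows); alternative decomposition, same cost.

-- row['features'] (first-match dict lookup; the [] default is only reached outside Pre_, where Python raises KeyError)
def pvFeat (r : List (String × List (String × Int))) : List (String × Int) :=
  PySem.Dict.getD (PySem.Dict.mk r) "features" []

-- not k.startswith('has_') and not k.startswith('is_')
def pvOk (k : String) : Bool :=
  !(PySem.Str.startswith k "has_") && !(PySem.Str.startswith k "is_")

-- ===== PORT A =====
-- set(row['features'].keys())
def pvKeysA (r : List (String × List (String × Int))) : PySem.Set String :=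
  PySem.Set.ofList ((pvFeat r).map Prod.fst)

def extract_common_features_py (rows : List (List (String × List (String × Int)))) : List String :=
  match rows with
  | [] => []
  | r0 :: rest =>
    let common := rest.foldl (fun c r => PySem.Set.inter c (pvKeysA r)) (pvKeysA r0)
    PySem.Set.ofList (common.filter (fun k => pvOk k))

-- ===== PORT B =====
def extract_common_features_py_alt (rows : List (List (String × List (String × Int)))) : List String :=
  let counts := rows.foldl
    (fun d row => (PySem.List.dedup ((pvFeat row).map Prod.fst)).foldl
        (fun d k => d.insert k (d.getD k 0 + 1)) d)
    PySem.Dict.empty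
  let n : Int := rows.length
  PySem.Set.ofList ((counts.items.filter (fun p => p.2 == n && pvOk p.1)).map Prod.fst)

-- ===== PRECONDITION & SPEC =====
-- Pre_ excludes exactly the rows lacking a 'features' key, on which the Python A raises KeyError.
def Pre_extract_common_features_py (rows : List (List (String × List (String × Int)))) : Prop :=
  (rows.all (fun r => PySem.Dict.contains (PySem.Dict.mk r) "features")) = true
instance (rows : List (List (String × List (String × Int)))) : Decidable (Pre_extract_common_features_py rows) := by unfold Pre_extract_common_features_py; infer_instance

def pvWitness_extract_common_features_py : (List (List (String × List (String × Int)))) :=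
  [[("features", [("a", 1), ("has_b", 0)])], [("features", [("a", 2)])]]

def Spec_extract_common_features_py (rows : List (List (String × List (String × Int)))) (out : List String) : Prop := out = extract_common_features_py_alt rows
instance (rows : List (List (String × List (String × Int)))) (out : List String) : Decidable (Spec_extract_common_features_py rows out) := by unfold Spec_extract_common_features_py; infer_instance

-- ===== CLAIM (what is proved, stated in full; the proofs are below) =====
def Claim_equal_extract_common_features_py : Prop := ∀ (rows : List (List (String × List (String × Int)))), Dom_extract_common_features_py rows → Pre_extract_common_features_py rows → Spec_extract_common_features_py rows (extract_common_features_py rows)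

-- ===== LEMMAS AND PROOFS =====

theorem nodup_pvKeysA (r : List (String × List (String × Int))) : (pvKeysA r).Nodup :=
  PySem.Set.nodup_ofList _

-- A's intersection fold is a filter of the first row's key set by membership in every later row.
theorem foldl_inter_eq_filter (l : List (List (String × List (String × Int)))) (s : List String) :
    l.foldl (fun c r => PySem.Set.inter c (pvKeysA r)) s
      = s.filter (fun k => l.all (fun r => PySem.Set.contains (pvKeysA r) k)) := by
  induction l generalizing s with
  | nil => simp
  | cons r l ih =>
    rw [List.foldl_cons, ih]
    simp only [PySem.Set.inter, List.filter_filter, List.all_cons]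
    apply List.filter_congr
    intro x _
    simp [Bool.and_comm]

-- B's nested counting loop is the counter of the concatenation of all rows' key lists.
theorem counts_eq_counter (rows : List (List (String × List (String × Int)))) :
    rows.foldl
      (fun d row => (PySem.List.dedup ((pvFeat row).map Prod.fst)).foldl
          (fun d k => d.insert k (d.getD k 0 + 1)) d)
      PySem.Dict.empty
      = PySem.Dict.counter (rows.flatMap (fun r => pvKeysA r)) := by
  rw [← PySem.Dict.foldl_insert_getD_add_one_eq_counter, List.foldl_flatMap]
  rfl

-- count over the concatenation counts the rows containing the key
theorem count_flatMap_le (rows : List (List (String × List (String × Int)))) (k : String) :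
    (rows.flatMap (fun r => pvKeysA r)).count k ≤ rows.length := by
  induction rows with
  | nil => simp
  | cons r rs ih =>
    have h1 : (pvKeysA r).count k ≤ 1 :=
      List.nodup_iff_count_le_one.mp (PySem.Set.nodup_ofList _) k
    simp only [List.flatMap_cons, List.count_append, List.length_cons]
    omega

theorem count_flatMap_eq_iff (rows : List (List (String × List (String × Int)))) (k : String) :
    ((rows.flatMap (fun r => pvKeysA r)).count k = rows.length) ↔ (∀ r ∈ rows, k ∈ pvKeysA r) := by
  induction rows with
  | nil => simp
  | cons r rs ih =>
    have h1 : (pvKeysA r).count k ≤ 1 :=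
      List.nodup_iff_count_le_one.mp (PySem.Set.nodup_ofList _) k
    have h2 := count_flatMap_le rs k
    simp only [List.flatMap_cons, List.count_append, List.length_cons, List.mem_cons]
    constructor
    · intro h
      have hc1 : (pvKeysA r).count k = 1 := by omega
      have hc2 : (rs.flatMap (fun r => pvKeysA r)).count k = rs.length := by omega
      refine fun x hx => ?_
      rcases hx with rfl | hx
      · exact List.count_pos_iff.mp (by omega)
      · exact (ih.mp hc2) x hx
    · intro h
      have hm : k ∈ pvKeysA r := h r (Or.inl rfl)
      have hc1 : 1 ≤ (pvKeysA r).count k := List.count_pos_iff.mpr hm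
      have hc2 : (rs.flatMap (fun r => pvKeysA r)).count k = rs.length :=
        ih.mpr (fun x hx => h x (Or.inr hx))
      omega

-- filtering by a predicate whose support lies in s ignores the deduplicating fold's additions
theorem filter_foldl_add (v : List String) (s : List String) (p : String → Bool)
    (h : ∀ x ∈ v, p x = true → x ∈ s) :
    (v.foldl PySem.Set.add s).filter p = s.filter p := by
  induction v generalizing s with
  | nil => rfl
  | cons x v ih =>
    simp only [List.foldl_cons]
    rw [PySem.Set.add_eq_ite]
    by_cases hx : x ∈ s
    · rw [if_pos hx]
      exact ih s (fun y hy => h y (List.mem_cons_of_mem _ hy))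
    · rw [if_neg hx]
      have hpx : p x = false := by
        by_contra hc
        exact hx (h x (List.mem_cons_self ..) (by simpa using hc))
      rw [ih (s ++ [x]) (fun y hy hpy => List.mem_append_left _ (h y (List.mem_cons_of_mem _ hy) hpy))]
      simp [List.filter_append, hpx]

-- ===== VERDICT (by name: the statement is the Claim_ definition above) =====
theorem extract_common_features_py_spec : Claim_equal_extract_common_features_py := by
  intro rows _ _
  unfold Spec_extract_common_features_py extract_common_features_py extract_common_features_py_alt
  rw [counts_eq_counter]
  cases rows with
  | nil => rfl
  | cons r0 rest =>
    dsimp only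
    rw [foldl_inter_eq_filter, List.filter_filter, PySem.Dict.items_counter, List.filter_map,
      List.map_map]
    have hL : ((r0 :: rest).flatMap fun r => pvKeysA r) = pvKeysA r0 ++ (rest.flatMap fun r => pvKeysA r) := by
      simp
    set L := (r0 :: rest).flatMap fun r => pvKeysA r with hLdef
    set q : String → Bool := fun k => ((L.count k : Int) == ((r0 :: rest).length : Int)) && pvOk k with hq
    have hmapcomp : ((fun p => Prod.fst p) ∘ fun k => (k, (L.count k : Int))) = id := rfl
    have hfiltcomp : ((fun p => p.2 == ((r0 :: rest).length : Int) && pvOk p.1) ∘ fun k => (k, (L.count k : Int))) = q := rfl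
    rw [hfiltcomp, hmapcomp, List.map_id]
    -- the counted ↔ membership bridge
    have hcount : ∀ k, q k = true → ∀ r ∈ r0 :: rest, k ∈ pvKeysA r := by
      intro k hk r hr
      have h1 : (L.count k : Int) = ((r0 :: rest).length : Int) := by
        have := (Bool.and_eq_true ..).mp hk |>.1
        exact_mod_cast eq_of_beq this
      exact (count_flatMap_eq_iff (r0 :: rest) k).mp (by exact_mod_cast h1) r hr
    -- strip the dedup of the tail: the filtered set lives inside pvKeysA r0
    have hofl : PySem.Set.ofList L = (rest.flatMap fun r => pvKeysA r).foldl PySem.Set.add (PySem.Set.ofList (pvKeysA r0)) := by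
      rw [hL, PySem.Set.ofList_eq_foldl, List.foldl_append]
      rfl
    rw [hofl, filter_foldl_add _ _ _ (by
      intro x _ hx
      exact (PySem.Set.mem_ofList _ _).mpr (hcount x hx r0 (List.mem_cons_self ..))),
      PySem.Set.ofList_eq_self_of_nodup (pvKeysA r0) (nodup_pvKeysA r0),
      PySem.Set.ofList_eq_self_of_nodup _ ((nodup_pvKeysA r0).filter _),
      PySem.Set.ofList_eq_self_of_nodup _ ((nodup_pvKeysA r0).filter _)]
    apply List.filter_congr
    intro k hk
    by_cases hall : ∀ r ∈ rest, k ∈ pvKeysA r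
    · have hc : L.count k = (r0 :: rest).length := by
        apply (count_flatMap_eq_iff (r0 :: rest) k).mpr
        intro r hr
        rcases List.mem_cons.mp hr with rfl | hr
        · exact hk
        · exact hall r hr
      simp only [hq, hc]
      simp
      exact fun _ => hall
    · have hcb : ((L.count k : Int) == ((rest.length : Int) + 1)) = false := by
        rw [beq_eq_false_iff_ne]
        intro hx
        apply hall
        intro r hr
        refine (count_flatMap_eq_iff (r0 :: rest) k).mp ?_ r (List.mem_cons_of_mem _ hr)
        simp only [List.length_cons]
        exact_mod_cast hx
      simp only [hq, List.length_cons]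
      push_cast
      simp [hcb]
      intro _
      push Not at hall
      exact hall
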